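-- pv_equiv track=rewrite | github.com/dwmclean1/Aircard-Status | aircardstatus.py | decode_bandmask
-- ===== SOURCE A (Python) =====
-- def decode_bandmask(mask):
--
--     bandmask = {    1: False,
--                     3: False,
--                     7: False,
--                     28: False,
--                     40: False  }
--
--     bin_masks = []
--
--     mask = mask.split(',')
--     mask.pop(0)
--
--     for elem in mask:
--         bin_mask = ''
--         for digit in reversed(elem.strip()):
--             byte = format(int(digit), 'b').zfill(4)
--             bin_mask = f'{byte}{bin_mask}'
--
--         bin_masks.append(bin_mask)
--
--     for mask in bin_masks:
--         for index, digit in enumerate(reversed(mask)):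
--             if digit == '1' and index+1 in bandmask.keys():
--                 bandmask[index+1] = True
--
--     return bandmask
-- ===== SOURCE B (Python) =====
-- def decode_bandmask(mask):
--     bandmask = {1: False, 3: False, 7: False, 28: False, 40: False}
--     for elem in mask.split(',')[1:]:
--         value = 0
--         for digit in elem.strip():
--             value = value * 16 + int(digit)
--         for p in bandmask:
--             if value // 2 ** (p - 1) % 2 == 1:
--                 bandmask[p] = True
--     return bandmask
-- ===== Notes on version B (the rewrite author's own statement) =====
-- stated objective: simpler
-- what changed: A decodes each field by building a binary string digit-by-digit (format/zfill concatenation) and then scanning the reversed string with enumerate against the dict keys; B Horner-packs each field into one integer (value = value*16 + int(digit)) and sets each band by an arithmetic bit test value // 2**(p-1) % 2.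
import Mathlib
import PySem

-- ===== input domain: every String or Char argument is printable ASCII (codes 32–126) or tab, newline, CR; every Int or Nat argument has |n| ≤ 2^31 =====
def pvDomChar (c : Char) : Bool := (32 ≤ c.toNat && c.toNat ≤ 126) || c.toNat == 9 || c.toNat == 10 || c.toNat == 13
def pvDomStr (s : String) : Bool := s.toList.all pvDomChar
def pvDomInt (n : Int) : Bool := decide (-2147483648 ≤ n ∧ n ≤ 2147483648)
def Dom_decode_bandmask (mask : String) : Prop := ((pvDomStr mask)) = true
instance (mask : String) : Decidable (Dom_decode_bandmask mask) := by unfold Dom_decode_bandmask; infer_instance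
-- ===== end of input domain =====

-- B replaces A's per-digit binary-string building and enumerate scan by Horner-packing each
-- field into an integer and testing the bit at position p-1 arithmetically (objective: simpler).

-- ===== PORT A =====
-- byte = format(int(digit), 'b').zfill(4); int(digit) = PySem.Int.ofChars? [c].
-- The .getD 0 default is never reached inside Pre_ (a non-digit char makes int() raise ValueError, excluded by Pre_).
def pvNibble (c : Char) : List Char :=
  PySem.Chars.zfill (PySem.Int.toBinChars ((PySem.Int.ofChars? [c]).getD 0)) 4

-- the body of A's inner for-loop: if digit == '1' and index+1 in bandmask.keys(): bandmask[index+1] = True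
def pvUpdA (d : PySem.Dict Int Bool) (q : Int × Char) : PySem.Dict Int Bool :=
  if q.2 = '1' ∧ d.contains (q.1 + 1) = true then d.insert (q.1 + 1) true else d

def decode_bandmask (mask : String) : List (Int × Bool) :=
  let bandmask : PySem.Dict Int Bool :=
    PySem.Dict.ofList [(1, false), (3, false), (7, false), (28, false), (40, false)]
  -- mask.split(','): sep "," ≠ "" so split? is always some; mask.pop(0) drops the head (split never returns [])
  let fields := ((PySem.Str.split? mask ",").getD []).drop 1
  let bin_masks := fields.foldl (fun acc elem =>
      acc ++ [(PySem.Str.strip elem).toList.reverse.foldl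
                (fun bm c => pvNibble c ++ bm) ([] : List Char)]) []
  let dfin := bin_masks.foldl (fun d bm =>
      (PySem.List.enumerate bm.reverse).foldl pvUpdA d)
    bandmask
  dfin.items

-- ===== PORT B =====
def decode_bandmask_alt (mask : String) : List (Int × Bool) :=
  let bandmask : PySem.Dict Int Bool :=
    PySem.Dict.ofList [(1, false), (3, false), (7, false), (28, false), (40, false)]
  -- mask.split(',')[1:]
  let fields := ((PySem.Str.split? mask ",").getD []).drop 1
  let dfin := fields.foldl (fun d elem =>
      -- value = value * 16 + int(digit); the .getD 0 default is never reached inside Pre_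
      let value := (PySem.Str.strip elem).toList.foldl
          (fun v c => v * 16 + (PySem.Int.ofChars? [c]).getD 0) (0 : Int)
      -- for p in bandmask: if value // 2 ** (p - 1) % 2 == 1: bandmask[p] = True
      -- 2 ** (p - 1) ported via .toNat exponent: exact since every key p ≥ 1
      d.keys.foldl (fun d' p =>
          if PySem.Int.mod (PySem.Int.floordiv value ((2 : Int) ^ (p - 1).toNat)) 2 = 1
          then d'.insert p true else d') d) bandmask
  dfin.items

-- ===== PRECONDITION & SPEC =====
-- Pre_ excludes exactly the inputs on which A raises ValueError: some character of a stripped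
-- field (after the first comma) is not a decimal digit, so int(digit) raises (B raises there too).
def Pre_decode_bandmask (mask : String) : Prop :=
  ((((PySem.Str.split? mask ",").getD []).drop 1).all (fun elem =>
    ((PySem.Str.strip elem).toList).all (fun c =>
      (['0', '1', '2', '3', '4', '5', '6', '7', '8', '9'] : List Char).contains c))) = true
instance (mask : String) : Decidable (Pre_decode_bandmask mask) := by
  unfold Pre_decode_bandmask; infer_instance

def pvWitness_decode_bandmask : String := "hdr,5,40"

def Spec_decode_bandmask (mask : String) (out : List (Int × Bool)) : Prop := out = decode_bandmask_alt mask
instance (mask : String) (out : List (Int × Bool)) : Decidable (Spec_decode_bandmask mask out) := by unfold Spec_decode_bandmask; infer_instance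

-- ===== CLAIM (what is proved, stated in full; the proofs are below) =====
def Claim_equal_decode_bandmask : Prop := ∀ (mask : String), Dom_decode_bandmask mask → Pre_decode_bandmask mask → Spec_decode_bandmask mask (decode_bandmask mask)

-- ===== LEMMAS AND PROOFS =====

def pvDigits : List Char := ['0', '1', '2', '3', '4', '5', '6', '7', '8', '9']

def pvDig (c : Char) : Nat := c.toNat - 48

def pvNv (cs : List Char) : Nat := cs.foldl (fun v c => v * 16 + pvDig c) 0

def pvBits (cs : List Char) : List Char := (cs.flatMap pvNibble).reverse

def pvHit (bits : List Char) (j p : Nat) : Bool :=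
  decide (j < p) && (bits.getD (p - 1 - j) '0' == '1')

theorem pv_dig_lt (c : Char) (hc : c ∈ pvDigits) : pvDig c < 16 := by fin_cases hc <;> decide

theorem pv_four_spec (d : Nat) (hd : d < 16) (l : List Char)
    (h : l = [if d.testBit 0 then '1' else '0', if d.testBit 1 then '1' else '0',
              if d.testBit 2 then '1' else '0', if d.testBit 3 then '1' else '0']) :
    ∀ k, (l.getD k '0' == '1') = d.testBit k := by
  subst h
  intro k
  match k with
  | 0 => cases h0 : d.testBit 0 <;> simp [List.getD]
  | 1 => cases h0 : d.testBit 1 <;> simp [List.getD]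
  | 2 => cases h0 : d.testBit 2 <;> simp [List.getD]
  | 3 => cases h0 : d.testBit 3 <;> simp [List.getD]
  | (k+4) =>
    have : d.testBit (k+4) = false := by
      apply Nat.testBit_lt_two_pow
      calc d < 16 := hd
        _ ≤ 2 ^ (k+4) := by
            have : (16:Nat) = 2^4 := by norm_num
            rw [this]; exact Nat.pow_le_pow_right (by norm_num) (by omega)
    simp [List.getD, this]

theorem pv_char_facts (c : Char) (hc : c ∈ pvDigits) :
    (PySem.Int.ofChars? [c]).getD 0 = ((pvDig c : Nat) : Int) ∧
    (pvNibble c).reverse.length = 4 ∧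
    (∀ k, ((pvNibble c).reverse.getD k '0' == '1') = (pvDig c).testBit k) := by
  fin_cases hc <;>
    exact ⟨by decide, by decide, pv_four_spec _ (by decide) _ (by decide)⟩

theorem pv_binmask_eq (cs : List Char) :
    ∀ acc : List Char,
      cs.reverse.foldl (fun bm c => pvNibble c ++ bm) acc = cs.flatMap pvNibble ++ acc := by
  induction cs with
  | nil => intro acc; simp
  | cons c t ih =>
      intro acc
      simp only [List.reverse_cons, List.foldl_append, List.foldl_cons, List.foldl_nil,
        List.flatMap_cons, ih, List.append_assoc]

theorem pv_value_eq (cs : List Char) (hcs : ∀ c ∈ cs, c ∈ pvDigits) :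
    ∀ a : Nat,
      cs.foldl (fun v c => v * 16 + (PySem.Int.ofChars? [c]).getD 0) (a : Int)
        = ((cs.foldl (fun v c => v * 16 + pvDig c) a : Nat) : Int) := by
  induction cs with
  | nil => intro a; simp
  | cons c t ih =>
      intro a
      simp only [List.foldl_cons]
      rw [(pv_char_facts c (hcs c (by simp))).1]
      rw [show ((a:Int) * 16 + ((pvDig c : Nat) : Int)) = ((a * 16 + pvDig c : Nat) : Int) by push_cast; ring]
      exact ih (fun c hc => hcs c (by simp [hc])) _

theorem pv_testBit_pack (m d : Nat) (hd : d < 16) :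
    (∀ k, k < 4 → (m * 16 + d).testBit k = d.testBit k) ∧
    (∀ k, (m * 16 + d).testBit (k + 4) = m.testBit k) := by
  constructor
  · intro k hk
    interval_cases k <;>
      · simp only [Nat.testBit_eq_decide_div_mod_eq]
        rw [decide_eq_decide]; norm_num; omega
  · intro k
    simp only [Nat.testBit_eq_decide_div_mod_eq]
    rw [decide_eq_decide]
    have h1 : 2 ^ (k + 4) = 16 * 2 ^ k := by ring
    rw [h1, ← Nat.div_div_eq_div_mul]
    have h2 : (m * 16 + d) / 16 = m := by omega
    rw [h2]

theorem pv_nv_append (cs : List Char) (c : Char) :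
    pvNv (cs ++ [c]) = pvNv cs * 16 + pvDig c := by
  simp [pvNv, List.foldl_append]

theorem pv_bits_spec (cs : List Char) (hcs : ∀ c ∈ cs, c ∈ pvDigits) :
    ∀ k, ((pvBits cs).getD k '0' == '1') = (pvNv cs).testBit k := by
  induction cs using List.reverseRecOn with
  | nil => intro k; simp [pvBits, pvNv, List.getD]
  | append_singleton cs c ih =>
      intro k
      have hc : c ∈ pvDigits := hcs c (by simp)
      have hcs' : ∀ c ∈ cs, c ∈ pvDigits := fun x hx => hcs x (by simp [hx])
      obtain ⟨-, hlen, hbit⟩ := pv_char_facts c hc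
      have hb : pvBits (cs ++ [c]) = (pvNibble c).reverse ++ pvBits cs := by
        simp [pvBits, List.flatMap_append]
      rw [hb, pv_nv_append]
      obtain ⟨hlow, hhigh⟩ := pv_testBit_pack (pvNv cs) (pvDig c) (pv_dig_lt c hc)
      by_cases hk : k < 4
      · rw [List.getD_append _ _ _ _ (by omega), hbit k, hlow k hk]
      · obtain ⟨k', rfl⟩ : ∃ k', k = k' + 4 := ⟨k - 4, by omega⟩
        rw [List.getD_append_right _ _ _ _ (by omega), hlen]
        rw [show k' + 4 - 4 = k' from by omega, ih hcs' k', hhigh k']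

theorem pv_hit_cons (c : Char) (bits : List Char) (j p : Nat) :
    pvHit (c :: bits) j p = ((decide (p = j + 1) && (c == '1')) || pvHit bits (j + 1) p) := by
  unfold pvHit
  rcases Nat.lt_trichotomy p (j + 1) with h | h | h
  · have h1 : ¬ j < p := by omega
    have h2 : ¬ j + 1 < p := by omega
    have h3 : ¬ p = j + 1 := by omega
    simp [h1, h2, h3]
  · subst h
    have h1 : j < j + 1 := by omega
    have h2 : ¬ j + 1 < j + 1 := by omega
    have h3 : j + 1 - 1 - j = 0 := by omega
    simp [h1, List.getD]
  · have h1 : j < p := by omega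
    have h3 : ¬ p = j + 1 := by omega
    obtain ⟨n, hn⟩ : ∃ n, p - 1 - j = n + 1 := ⟨p - 2 - j, by omega⟩
    have hn' : p - 1 - (j + 1) = n := by omega
    simp [h1, h, h3, hn, hn', List.getD]

theorem pv_keys_foldl_updA (l : List (Int × Char)) (d : PySem.Dict Int Bool) :
    (l.foldl pvUpdA d).keys = d.keys := by
  induction l generalizing d with
  | nil => rfl
  | cons q t ih =>
      rw [List.foldl_cons, ih]
      unfold pvUpdA
      split_ifs with h
      · exact PySem.Dict.keys_insert_of_contains d true h.2
      · rfl

theorem pv_getD_foldl_updA (bits : List Char) :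
    ∀ (j : Nat) (d : PySem.Dict Int Bool) (p : Nat), 1 ≤ p →
      ((PySem.List.enumerate bits (j : Int)).foldl pvUpdA d).getD (p : Int) false
        = (d.getD (p : Int) false || (pvHit bits j p && d.contains (p : Int))) := by
  induction bits with
  | nil => intro j d p hp; simp [PySem.List.enumerate_nil, pvHit]
  | cons c t ih =>
      intro j d p hp
      rw [PySem.List.enumerate_cons, List.foldl_cons]
      have hcast : (j : Int) + 1 = ((j + 1 : Nat) : Int) := by omega
      rw [hcast, ih (j + 1) (pvUpdA d ((j : Int), c)) p hp, pv_hit_cons]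
      have hkeys : (pvUpdA d ((j : Int), c)).contains (p : Int) = d.contains (p : Int) := by
        have h1 := pv_keys_foldl_updA [((j : Int), c)] d
        simp only [List.foldl_cons, List.foldl_nil] at h1
        rw [PySem.Dict.contains_eq_decide_mem_keys, PySem.Dict.contains_eq_decide_mem_keys, h1]
      rw [hkeys]
      unfold pvUpdA
      simp only
      split_ifs with h
      · obtain ⟨hc, hcon⟩ := h
        rw [PySem.Dict.getD_insert]
        by_cases hpj : p = j + 1
        · have hpe : ((p : Nat) : Int) = (j : Int) + 1 := by omega
          have hcon' : d.contains ((p : Nat) : Int) = true := by rw [hpe]; exact hcon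
          simp [hpj, hc]
          exact Or.inr hcon
        · have hne : ((p : Nat) : Int) ≠ (j : Int) + 1 := by
            rw [hcast]; intro hx
            exact hpj (by exact_mod_cast hx)
          simp [hne, hpj]
      · have hz : ((decide (p = j + 1) && (c == '1')) && d.contains (p : Int)) = false := by
          by_cases hc : c = '1'
          · have hnc : d.contains ((j : Int) + 1) = false := by
              cases hx : d.contains ((j : Int) + 1)
              · rfl
              · exact absurd ⟨hc, hx⟩ h
            by_cases hpj : p = j + 1
            · have hpe : ((p : Nat) : Int) = (j : Int) + 1 := by omega
              rw [hpe, hnc]; simp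
            · simp [hpj]
          · have : (c == '1') = false := by simp [hc]
            simp [this]
        rw [Bool.and_or_distrib_right, hz]
        simp

theorem pv_keys_foldl_updB (ks : List Int) (tst : Int → Prop) [DecidablePred tst] :
    ∀ d : PySem.Dict Int Bool, (∀ p ∈ ks, d.contains p = true) →
      (ks.foldl (fun d' p => if tst p then d'.insert p true else d') d).keys = d.keys := by
  induction ks with
  | nil => intro d _; rfl
  | cons p t ih =>
      intro d hd
      rw [List.foldl_cons]
      have hcp : d.contains p = true := hd p (by simp)
      have hkeys : ∀ d' : PySem.Dict Int Bool, d'.keys = d.keys →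
          (∀ q ∈ t, d'.contains q = true) := by
        intro d' hk q hq
        rw [PySem.Dict.contains_eq_decide_mem_keys, hk, ← PySem.Dict.contains_eq_decide_mem_keys]
        exact hd q (by simp [hq])
      split_ifs with h
      · have hk1 : (d.insert p true).keys = d.keys := PySem.Dict.keys_insert_of_contains d true hcp
        rw [ih _ (hkeys _ hk1), hk1]
      · exact ih _ (hkeys _ rfl)

theorem pv_getD_foldl_updB (ks : List Int) (tst : Int → Prop) [DecidablePred tst] :
    ∀ (d : PySem.Dict Int Bool) (q : Int),
      (ks.foldl (fun d' p => if tst p then d'.insert p true else d') d).getD q false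
        = (d.getD q false || (decide (q ∈ ks) && decide (tst q))) := by
  induction ks with
  | nil => intro d q; simp
  | cons p t ih =>
      intro d q
      rw [List.foldl_cons, ih]
      split_ifs with h
      · rw [PySem.Dict.getD_insert]
        by_cases hqp : q = p
        · subst hqp; simp [h]
        · simp [hqp]
      · by_cases hqp : q = p
        · subst hqp; simp [h]
        · simp [hqp]

theorem pv_test_bridge (n : Nat) (p : Nat) (hp : 1 ≤ p) :
    (PySem.Int.mod (PySem.Int.floordiv (n : Int) ((2 : Int) ^ (((p : Int)) - 1).toNat)) 2 = 1)
      ↔ n.testBit (p - 1) := by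
  have h1 : (((p : Int)) - 1).toNat = p - 1 := by omega
  have h2 : ((2 : Int) ^ (p - 1)) = (((2 ^ (p - 1) : Nat)) : Int) := by norm_cast
  rw [h1, h2, PySem.Int.floordiv_natCast, PySem.Int.mod_eq_emod_of_pos (by norm_num)]
  simp only [Nat.testBit_eq_decide_div_mod_eq, decide_eq_true_eq]
  omega

theorem pv_decide_test (cs : List Char) (p : Nat) (hp : 1 ≤ p) :
    decide (PySem.Int.mod (PySem.Int.floordiv ((pvNv cs : Nat) : Int)
        ((2 : Int) ^ ((((p : Nat) : Int)) - 1).toNat)) 2 = 1) = (pvNv cs).testBit (p - 1) := by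
  have h := pv_test_bridge (pvNv cs) p hp
  rcases Bool.dichotomy ((pvNv cs).testBit (p - 1)) with hb | hb <;> rw [hb] at h ⊢
  · rw [Bool.false_eq_true, iff_false] at h
    exact decide_eq_false h
  · exact decide_eq_true (h.mpr rfl)

theorem pv_key_eq (d : PySem.Dict Int Bool)
    (cs : List Char) (hcs : ∀ c ∈ cs, c ∈ pvDigits) (p : Nat) (hp : 1 ≤ p)
    (hmem : ((p : Nat) : Int) ∈ d.keys) :
    ((PySem.List.enumerate (pvBits cs) ((0 : Nat) : Int)).foldl pvUpdA d).getD ((p : Nat) : Int) false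
      = ((PySem.Dict.keys d).foldl (fun d' q =>
          if PySem.Int.mod (PySem.Int.floordiv ((pvNv cs : Nat) : Int)
              ((2 : Int) ^ (q - 1).toNat)) 2 = 1
          then d'.insert q true else d') d).getD ((p : Nat) : Int) false := by
  have hcont : d.contains ((p : Nat) : Int) = true := by
    rw [PySem.Dict.contains_eq_decide_mem_keys]; simp [hmem]
  rw [pv_getD_foldl_updA (pvBits cs) 0 d p hp,
      pv_getD_foldl_updB d.keys
        (fun q => PySem.Int.mod (PySem.Int.floordiv ((pvNv cs : Nat) : Int)
            ((2 : Int) ^ (q - 1).toNat)) 2 = 1) d ((p : Nat) : Int)]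
  have hhit : pvHit (pvBits cs) 0 p = (pvNv cs).testBit (p - 1) := by
    unfold pvHit
    have h0 : (0 : Nat) < p := hp
    simp only [h0, decide_true, Bool.true_and, Nat.sub_zero]
    exact pv_bits_spec cs hcs (p - 1)
  rw [hhit, hcont, pv_decide_test cs p hp]
  simp [hmem]

theorem pv_step_eq (d : PySem.Dict Int Bool) (hk : d.keys = [1, 3, 7, 28, 40])
    (elem : String) (he : ∀ c ∈ (PySem.Str.strip elem).toList, c ∈ pvDigits) :
    (PySem.List.enumerate ((PySem.Str.strip elem).toList.reverse.foldl
        (fun bm c => pvNibble c ++ bm) ([] : List Char)).reverse).foldl pvUpdA d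
      = ((PySem.Dict.keys d).foldl (fun d' p =>
            if PySem.Int.mod (PySem.Int.floordiv
                ((PySem.Str.strip elem).toList.foldl
                  (fun v c => v * 16 + (PySem.Int.ofChars? [c]).getD 0) (0 : Int))
                ((2 : Int) ^ (p - 1).toNat)) 2 = 1
            then d'.insert p true else d') d) := by
  set cs := (PySem.Str.strip elem).toList with hcs_def
  have hbm : cs.reverse.foldl (fun bm c => pvNibble c ++ bm) ([] : List Char) = cs.flatMap pvNibble := by
    rw [pv_binmask_eq cs []]; simp
  have hval : cs.foldl (fun v c => v * 16 + (PySem.Int.ofChars? [c]).getD 0) (0 : Int)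
      = ((pvNv cs : Nat) : Int) := by
    exact_mod_cast pv_value_eq cs he 0
  rw [hbm, hval]
  have hcont : ∀ q ∈ d.keys, d.contains q = true := by
    intro q hq; rw [PySem.Dict.contains_eq_decide_mem_keys]; simp [hq]
  have hkL : ((PySem.List.enumerate (cs.flatMap pvNibble).reverse).foldl pvUpdA d).keys = d.keys :=
    pv_keys_foldl_updA _ d
  have hkR : ((PySem.Dict.keys d).foldl (fun d' q =>
      if PySem.Int.mod (PySem.Int.floordiv ((pvNv cs : Nat) : Int)
          ((2 : Int) ^ (q - 1).toNat)) 2 = 1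
      then d'.insert q true else d') d).keys = d.keys :=
    pv_keys_foldl_updB d.keys _ d hcont
  apply PySem.Dict.ext
  rw [PySem.Dict.items_eq_map_keys _ (by rw [hkL, hk]; decide) false,
      PySem.Dict.items_eq_map_keys _ (by rw [hkR, hk]; decide) false,
      hkL, hkR]
  apply List.map_congr_left
  intro q hq
  rw [hk] at hq
  have key := pv_key_eq d cs he
  have e0 : ((0 : Nat) : Int) = (0 : Int) := by norm_num
  rw [e0] at key
  fin_cases hq
  · exact congrArg _ (key 1 (by norm_num) (by rw [hk]; norm_num))
  · exact congrArg _ (key 3 (by norm_num) (by rw [hk]; norm_num))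
  · exact congrArg _ (key 7 (by norm_num) (by rw [hk]; norm_num))
  · exact congrArg _ (key 28 (by norm_num) (by rw [hk]; norm_num))
  · exact congrArg _ (key 40 (by norm_num) (by rw [hk]; norm_num))

theorem pv_foldl_congr_inv {α β : Type} (P : β → Prop) (Q : α → Prop) (f g : β → α → β) :
    ∀ (fs : List α) (b : β), (∀ a ∈ fs, Q a) → P b →
      (∀ b a, P b → Q a → f b a = g b a) → (∀ b a, P b → Q a → P (g b a)) →
      fs.foldl f b = fs.foldl g b := by
  intro fs
  induction fs with
  | nil => intro b _ _ _ _; rfl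
  | cons a t ih =>
      intro b hQ hP hfg hPg
      rw [List.foldl_cons, List.foldl_cons, hfg b a hP (hQ a (by simp))]
      exact ih _ (fun x hx => hQ x (by simp [hx])) (hPg b a hP (hQ a (by simp))) hfg hPg

-- ===== VERDICT (by name: the statement is the Claim_ definition above) =====
theorem decode_bandmask_spec : Claim_equal_decode_bandmask := by
  intro mask _hdom hpre
  unfold Pre_decode_bandmask at hpre
  simp only [List.all_eq_true, List.contains_eq_mem, decide_eq_true_eq] at hpre
  unfold Spec_decode_bandmask decode_bandmask decode_bandmask_alt
  simp only [PySem.List.foldl_append_singleton_eq_map, List.nil_append, List.foldl_map]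
  refine congrArg PySem.Dict.items
    (pv_foldl_congr_inv (fun d => d.keys = [1, 3, 7, 28, 40])
      (fun e => ∀ c ∈ (PySem.Str.strip e).toList, c ∈ pvDigits) _ _ _ _ hpre (by decide)
      (fun d e hP hQ => pv_step_eq d hP e hQ) ?_)
  intro d e hP hQ
  rw [pv_keys_foldl_updB d.keys _ d
    (by intro q hq; rw [PySem.Dict.contains_eq_decide_mem_keys]; simp [hq])]
  exact hP
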